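-- pv_equiv track=rewrite | github.com/zahias/advising | curriculum_visualizer.py | _get_related_nodes
-- ===== SOURCE A (Python) =====
-- from typing import List, Dict, Set, Optional
--
-- def _get_related_nodes(adj: Dict, focus: str, max_depth: int) -> Set[str]:
--     """Finds all ancestors and descendants of a focus node up to max_depth."""
--     related = {focus}
--
--     # Reverse adjacency for ancestor lookup
--     rev_adj = {}
--     for source, reqs in adj.items():
--         for _, target in reqs:
--             if target not in rev_adj:
--                 rev_adj[target] = []
--             rev_adj[target].append(source)
--
--     # BFS for descendants
--     queue = [(focus, 0)]
--     visited = {focus}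
--     while queue:
--         node, dist = queue.pop(0)
--         if dist >= max_depth:
--             continue
--         for _, neighbor in adj.get(node, []):
--             if neighbor not in visited:
--                 visited.add(neighbor)
--                 related.add(neighbor)
--                 queue.append((neighbor, dist + 1))
--
--     # BFS for ancestors
--     queue = [(focus, 0)]
--     visited = {focus}
--     while queue:
--         node, dist = queue.pop(0)
--         if dist >= max_depth:
--             continue
--         for neighbor in rev_adj.get(node, []):
--             if neighbor not in visited:
--                 visited.add(neighbor)
--                 related.add(neighbor)
--                 queue.append((neighbor, dist + 1))
--
--     return related
-- ===== SOURCE B (Python) =====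
-- def _get_related_nodes(adj, focus, max_depth):
--     """Finds all ancestors and descendants of a focus node up to max_depth."""
--     # Flatten the graph once into a plain edge list; no adjacency/reverse dicts,
--     # no queue: reachability is computed by repeated whole-edge-list scans
--     # (Bellman-Ford-style rounds), one fixpoint loop per direction.
--     edges = [(source, target) for source, reqs in adj.items() for _, target in reqs]
--
--     def reach(edge_list):
--         r = {focus}
--         for _ in range(max_depth):
--             new = {t for s, t in edge_list if s in r and t not in r}
--             if not new:
--                 break
--             r |= new
--         return r
--
--     descendants = reach(edges)
--     ancestors = reach([(t, s) for s, t in edges])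
--     return descendants | ancestors
-- ===== Notes on version B (the rewrite author's own statement) =====
-- stated objective: alternative
-- what changed: Replaced the reverse-adjacency dict plus two queue-based BFS traversals by a frontierless fixpoint: the graph is flattened once into a plain edge list and each direction's reachable set is grown by repeated whole-edge-list scans (Bellman-Ford-style rounds, at most max_depth of them, stopping when a round adds nothing); ancestors reuse the same loop on the reversed edge list, so no rev_adj dict, no queue and no per-node distances exist.
import Mathlib
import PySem

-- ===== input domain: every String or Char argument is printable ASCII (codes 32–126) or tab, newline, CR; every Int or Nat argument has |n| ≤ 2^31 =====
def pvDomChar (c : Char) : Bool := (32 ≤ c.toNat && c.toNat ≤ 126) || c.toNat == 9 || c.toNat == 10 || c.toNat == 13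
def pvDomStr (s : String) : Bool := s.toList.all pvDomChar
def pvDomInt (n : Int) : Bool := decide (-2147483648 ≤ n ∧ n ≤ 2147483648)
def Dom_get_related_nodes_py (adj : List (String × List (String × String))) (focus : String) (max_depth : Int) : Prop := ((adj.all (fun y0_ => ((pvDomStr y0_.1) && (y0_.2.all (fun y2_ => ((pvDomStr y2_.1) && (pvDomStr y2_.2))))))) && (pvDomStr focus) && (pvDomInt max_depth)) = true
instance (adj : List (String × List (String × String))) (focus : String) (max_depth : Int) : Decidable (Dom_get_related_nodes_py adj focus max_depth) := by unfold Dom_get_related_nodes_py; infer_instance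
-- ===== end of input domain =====

-- B replaces A's reverse-adjacency dict and two queue-based BFS traversals by a frontierless
-- fixpoint over a flat edge list (repeated whole-edge-list scans, ancestors = same loop on the
-- reversed edge list): an alternative algorithm of similar cost.
-- The Python function returns a SET (unordered); both ports represent that set by the sorted
-- list of its distinct elements (outputs are compared as finite sets).

-- ===== PORT A =====
-- rev_adj construction: 'if target not in rev_adj: rev_adj[target] = []; rev_adj[target].append(source)'
def pvRevStep (source : String) (rd : PySem.Dict String (List String)) (e : String × String) : PySem.Dict String (List String) :=
  let rd := if rd.contains e.2 then rd else rd.insert e.2 ([] : List String)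
  rd.modify e.2 [] (fun l => l ++ [source])

def pvRevAdj (adj : List (String × List (String × String))) : PySem.Dict String (List String) :=
  adj.foldl (fun rd p => p.2.foldl (pvRevStep p.1) rd) PySem.Dict.empty

-- one neighbour of A's inner 'for' loop: guard on visited, then add to visited/related/queue
def pvStepA (d : Int) (st : PySem.Set String × PySem.Set String × List (String × Int)) (nb : String) :
    PySem.Set String × PySem.Set String × List (String × Int) :=
  if PySem.Set.contains st.1 nb then st
  else (PySem.Set.add st.1 nb, PySem.Set.add st.2.1 nb, st.2.2 ++ [(nb, d + 1)])

-- A's 'while queue' loop; fuel only makes the recursion total (A's loop terminates, see fuel bound in the port)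
def pvLoopA (nbrs : String → List String) (md : Int) :
    Nat → List (String × Int) → PySem.Set String → PySem.Set String → PySem.Set String
  | 0, _, _, r => r
  | _ + 1, [], _, r => r
  | fuel + 1, (n, d) :: rest, v, r =>
    if md ≤ d then pvLoopA nbrs md fuel rest v r
    else
      let st := (nbrs n).foldl (pvStepA d) (v, r, rest)
      pvLoopA nbrs md fuel st.2.2 st.1 st.2.1

def get_related_nodes_py (adj : List (String × List (String × String))) (focus : String) (max_depth : Int) : List String :=
  let related := PySem.Set.ofList [focus]
  let rev_adj := pvRevAdj adj
  -- fuel bound: total pops ≤ 1 + enqueues ≤ 1 + 2*(#keys + #edges); never reached, only for totality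
  let fuel := 1 + 2 * (adj.length + (adj.map (fun p => p.2.length)).sum)
  let related := pvLoopA (fun n => ((PySem.Dict.mk adj).getD n []).map (fun e => e.2)) max_depth fuel
                   [(focus, 0)] (PySem.Set.ofList [focus]) related
  let related := pvLoopA (fun n => rev_adj.getD n []) max_depth fuel
                   [(focus, 0)] (PySem.Set.ofList [focus]) related
  PySem.List.sorted related (fun x => x) false

-- ===== PORT B =====
-- edges = [(source, target) for source, reqs in adj.items() for _, target in reqs]
def pvEdges (adj : List (String × List (String × String))) : List (String × String) :=
  adj.flatMap (fun p => p.2.map (fun e => (p.1, e.2)))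

-- new = {t for s, t in edge_list if s in r and t not in r}
def pvRound (edges : List (String × String)) (r : PySem.Set String) : PySem.Set String :=
  edges.foldl (fun new e =>
    if PySem.Set.contains r e.1 && !(PySem.Set.contains r e.2) then PySem.Set.add new e.2 else new)
    PySem.Set.empty

-- 'for _ in range(max_depth): new = …; if not new: break; r |= new'
def pvReach (edges : List (String × String)) : Nat → PySem.Set String → PySem.Set String
  | 0, r => r
  | k + 1, r =>
    let new := pvRound edges r
    if new.isEmpty then r else pvReach edges k (PySem.Set.update r new)

def get_related_nodes_py_alt (adj : List (String × List (String × String))) (focus : String) (max_depth : Int) : List String :=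
  let edges := pvEdges adj
  let descendants := pvReach edges max_depth.toNat (PySem.Set.ofList [focus])
  let ancestors := pvReach (edges.map (fun e => (e.2, e.1))) max_depth.toNat (PySem.Set.ofList [focus])
  PySem.List.sorted (PySem.Set.union descendants ancestors) (fun x => x) false

-- ===== PRECONDITION & SPEC =====
-- Pre_ excludes association lists with duplicate keys: a Python dict cannot hold them (the dict
-- the caller builds collapses duplicates before A runs), so the assoc-list representation is
-- ambiguous there and neither first-match nor last-match porting is canonical.
def Pre_get_related_nodes_py (adj : List (String × List (String × String))) (focus : String) (max_depth : Int) : Prop :=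
  (adj.map (fun p => p.1)).Nodup
instance (adj : List (String × List (String × String))) (focus : String) (max_depth : Int) : Decidable (Pre_get_related_nodes_py adj focus max_depth) := by unfold Pre_get_related_nodes_py; infer_instance

def pvWitness_get_related_nodes_py : (List (String × List (String × String))) × String × Int :=
  ([("a", [("x", "b")]), ("b", [("y", "c")])], "b", 1)

def Spec_get_related_nodes_py (adj : List (String × List (String × String))) (focus : String) (max_depth : Int) (out : List String) : Prop := out = get_related_nodes_py_alt adj focus max_depth
instance (adj : List (String × List (String × String))) (focus : String) (max_depth : Int) (out : List String) : Decidable (Spec_get_related_nodes_py adj focus max_depth out) := by unfold Spec_get_related_nodes_py; infer_instance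

-- ===== CLAIM (what is proved, stated in full; the proofs are below) =====
def Claim_equal_get_related_nodes_py : Prop := ∀ (adj : List (String × List (String × String))) (focus : String) (max_depth : Int), Dom_get_related_nodes_py adj focus max_depth → Pre_get_related_nodes_py adj focus max_depth → Spec_get_related_nodes_py adj focus max_depth (get_related_nodes_py adj focus max_depth)

-- ===== LEMMAS AND PROOFS =====

-- proof-only intermediate: A's BFS re-expressed level-synchronously (bridges pvLoopA to pvReach)
def pvStepB (st : PySem.Set String × PySem.Set String × List String) (nb : String) :
    PySem.Set String × PySem.Set String × List String :=
  if PySem.Set.contains st.1 nb then st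
  else (PySem.Set.add st.1 nb, PySem.Set.add st.2.1 nb, st.2.2 ++ [nb])

def pvExpand (nbrs : String → List String) (st : PySem.Set String × PySem.Set String × List String)
    (frontier : List String) : PySem.Set String × PySem.Set String × List String :=
  frontier.foldl (fun st n => (nbrs n).foldl pvStepB st) st

def pvLevels (nbrs : String → List String) :
    Nat → List String → PySem.Set String → PySem.Set String → PySem.Set String
  | 0, _, _, r => r
  | k + 1, frontier, v, r =>
    if frontier.isEmpty then r
    else
      let st := pvExpand nbrs (v, r, []) frontier
      pvLevels nbrs k st.2.2 st.1 st.2.1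

-- all node names that can ever be enqueued: keys of adj and all edge targets
def pvU (adj : List (String × List (String × String))) : List String :=
  PySem.List.dedup (adj.map (fun p => p.1) ++ adj.flatMap (fun p => p.2.map (fun e => e.2)))

-- number of elements of U not yet visited (the potential that bounds future enqueues)
def pvCnv (U : List String) (v : PySem.Set String) : Nat :=
  (U.filter (fun y => !(PySem.Set.contains v y))).length

theorem pvLoopA_nil (nbrs : String → List String) (md : Int) (fuel : Nat)
    (v r : PySem.Set String) : pvLoopA nbrs md fuel [] v r = r := by
  cases fuel <;> simp [pvLoopA]

theorem pvLoopA_drain (nbrs : String → List String) (md : Int) :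
    ∀ (fuel : Nat) (q : List (String × Int)) (v r : PySem.Set String),
    (∀ p ∈ q, md ≤ p.2) → pvLoopA nbrs md fuel q v r = r := by
  intro fuel
  induction fuel with
  | zero => intro q v r _; simp [pvLoopA]
  | succ f ih =>
    intro q v r h
    cases q with
    | nil => simp [pvLoopA]
    | cons p rest =>
      obtain ⟨n, d⟩ := p
      have hd : md ≤ d := h (n, d) (by simp)
      simp only [pvLoopA, if_pos hd]
      exact ih rest v r (fun p hp => h p (List.mem_cons_of_mem _ hp))

-- the inner 'for neighbor' loops of A and B walk the same state; A's queue is B's frontier with dist d+1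
theorem pvInnerRel (d : Int) :
    ∀ (nbs : List String) (v r : PySem.Set String) (Q : List (String × Int)) (F : List String),
    nbs.foldl (pvStepA d) (v, r, Q ++ F.map (fun x => (x, d + 1))) =
      ((nbs.foldl pvStepB (v, r, F)).1, (nbs.foldl pvStepB (v, r, F)).2.1,
        Q ++ (nbs.foldl pvStepB (v, r, F)).2.2.map (fun x => (x, d + 1))) := by
  intro nbs
  induction nbs with
  | nil => intro v r Q F; simp
  | cons nb t ih =>
    intro v r Q F
    simp only [List.foldl_cons]
    by_cases hc : PySem.Set.contains v nb = true
    · simp only [pvStepA, pvStepB, hc, if_pos]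
      exact ih v r Q F
    · simp only [pvStepA, pvStepB, hc, Bool.false_eq_true, if_false]
      have := ih (PySem.Set.add v nb) (PySem.Set.add r nb) Q (F ++ [nb])
      simpa [List.map_append, List.append_assoc] using this

theorem pvFilter_ne_length (l : List String) (x : String) (hU : l.Nodup) (hx : x ∈ l) :
    (l.filter (fun y => !(y == x))).length + 1 = l.length := by
  have h1 := List.length_eq_countP_add_countP (p := fun y => !(y == x)) (l := l)
  have h2 : List.countP (fun a => decide ¬(!a == x) = true) l = List.count x l := by
    have he : (fun a : String => decide (¬(!a == x) = true)) = (fun a => a == x) := by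
      funext a; cases h : a == x <;> simp_all
    rw [he]; rfl
  have h3 : List.count x l = 1 := List.count_eq_one_of_mem hU hx
  rw [List.countP_eq_length_filter] at h1
  omega

theorem pvCnv_add (U : List String) (v : PySem.Set String) (x : String)
    (hU : U.Nodup) (hx : x ∈ U) (hc : PySem.Set.contains v x = false) :
    pvCnv U (PySem.Set.add v x) + 1 = pvCnv U v := by
  have hxv : x ∉ v := by simpa [PySem.Set.contains] using hc
  have hadd : PySem.Set.add v x = v ++ [x] := by simp [PySem.Set.add, PySem.Set.contains, hxv]
  unfold pvCnv
  rw [hadd]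
  have he : ∀ y : String, (!(PySem.Set.contains (v ++ [x]) y)) =
      ((!(y == x)) && !(PySem.Set.contains v y)) := by
    intro y; simp only [PySem.Set.contains, List.contains_append]
    cases h : (y == x) <;> simp_all
  rw [List.filter_congr (fun y _ => he y), ← List.filter_filter]
  exact pvFilter_ne_length _ x (hU.filter _) (by simp [PySem.Set.contains, hx, hxv])

-- the potential equation for one inner sweep
theorem pvCnv_fold (U : List String) (hU : U.Nodup) :
    ∀ (nbs : List String) (v r : PySem.Set String) (F : List String),
    (∀ x ∈ nbs, x ∈ U) →
    pvCnv U (nbs.foldl pvStepB (v, r, F)).1 + (nbs.foldl pvStepB (v, r, F)).2.2.length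
        = pvCnv U v + F.length
      ∧ F.length ≤ (nbs.foldl pvStepB (v, r, F)).2.2.length := by
  intro nbs
  induction nbs with
  | nil => intro v r F _; simp
  | cons nb t ih =>
    intro v r F hmem
    have hnb : nb ∈ U := hmem nb (by simp)
    have hrest : ∀ x ∈ t, x ∈ U := fun x hx => hmem x (List.mem_cons_of_mem _ hx)
    simp only [List.foldl_cons]
    by_cases hc : PySem.Set.contains v nb = true
    · simp only [pvStepB, hc, if_pos]
      exact ih v r F hrest
    · have hc' : PySem.Set.contains v nb = false := by simpa using hc
      simp only [pvStepB, hc', Bool.false_eq_true, if_false]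
      have h1 := ih (PySem.Set.add v nb) (PySem.Set.add r nb) (F ++ [nb]) hrest
      have h2 := pvCnv_add U v nb hU hnb hc'
      simp only [List.length_append, List.length_cons, List.length_nil] at h1 ⊢
      omega

theorem pvExpand_cons (nbrs : String → List String) (st : PySem.Set String × PySem.Set String × List String)
    (n : String) (F : List String) :
    pvExpand nbrs st (n :: F) = pvExpand nbrs ((nbrs n).foldl pvStepB st) F := by
  simp [pvExpand]

-- one pop of A's queue = feeding one frontier node to B's inner loop
theorem pvConsStep (nbrs : String → List String) (md d : Int) (hdlt : ¬ md ≤ d) (n : String)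
    (F1t F2 : List String) (v r : PySem.Set String) (f : Nat) :
    pvLoopA nbrs md (f + 1) ((n :: F1t).map (fun m => (m, d)) ++ F2.map (fun m => (m, d + 1))) v r
      = pvLoopA nbrs md f
          (F1t.map (fun m => (m, d)) ++ ((nbrs n).foldl pvStepB (v, r, F2)).2.2.map (fun m => (m, d + 1)))
          ((nbrs n).foldl pvStepB (v, r, F2)).1 ((nbrs n).foldl pvStepB (v, r, F2)).2.1 := by
  simp only [List.map_cons, List.cons_append, pvLoopA, if_neg hdlt]
  rw [pvInnerRel]

-- main correspondence: A's mixed two-level queue vs the mid-level level-sweep state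
theorem pvMain (U : List String) (hU : U.Nodup) (nbrs : String → List String)
    (hG : ∀ n, ∀ x ∈ nbrs n, x ∈ U) (md : Int) :
    ∀ (k : Nat) (d : Int) (F1 F2 : List String) (v r : PySem.Set String) (fuel : Nat),
    md - d = (k : Int) + 1 →
    F1.length + F2.length + 2 * pvCnv U v ≤ fuel →
    pvLoopA nbrs md fuel (F1.map (fun n => (n, d)) ++ F2.map (fun n => (n, d + 1))) v r =
      pvLevels nbrs k (pvExpand nbrs (v, r, F2) F1).2.2
        (pvExpand nbrs (v, r, F2) F1).1 (pvExpand nbrs (v, r, F2) F1).2.1 := by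
  intro k
  induction k with
  | zero =>
    intro d F1
    induction F1 with
    | nil =>
      intro F2 v r fuel hd _
      simp only [List.map_nil, List.nil_append, pvExpand, List.foldl_nil, pvLevels]
      apply pvLoopA_drain
      intro p hp
      obtain ⟨m, _, hm⟩ := List.mem_map.mp hp
      subst hm; omega
    | cons n F1t ih =>
      intro F2 v r fuel hd hf
      cases fuel with
      | zero => simp at hf
      | succ f =>
        rw [pvConsStep nbrs md d (by omega) n F1t F2 v r f, pvExpand_cons]
        have hc := pvCnv_fold U hU (nbrs n) v r F2 (hG n)
        exact ih _ _ _ f hd (by simp at hf ⊢; omega)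
  | succ k' ihk =>
    intro d F1
    induction F1 with
    | nil =>
      intro F2 v r fuel hd hf
      simp only [List.map_nil, List.nil_append, pvExpand, List.foldl_nil]
      match F2 with
      | [] => simp [pvLoopA_nil, pvLevels]
      | a :: tl =>
        have h := ihk (d + 1) (a :: tl) [] v r fuel (by omega) (by simp at hf ⊢; omega)
        simp only [List.map_nil, List.append_nil] at h
        rw [h]
        simp [pvLevels]
    | cons n F1t ih =>
      intro F2 v r fuel hd hf
      cases fuel with
      | zero => simp at hf
      | succ f =>
        rw [pvConsStep nbrs md d (by omega) n F1t F2 v r f, pvExpand_cons]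
        have hc := pvCnv_fold U hU (nbrs n) v r F2 (hG n)
        exact ih _ _ _ f hd (by simp at hf ⊢; omega)

-- one whole BFS run equals one whole level sweep
theorem pvPhase (U : List String) (hU : U.Nodup) (nbrs : String → List String)
    (hG : ∀ n, ∀ x ∈ nbrs n, x ∈ U) (md : Int) (focus : String)
    (v r : PySem.Set String) (fuel : Nat) (hf : 1 + 2 * pvCnv U v ≤ fuel) :
    pvLoopA nbrs md fuel [(focus, 0)] v r = pvLevels nbrs md.toNat [focus] v r := by
  by_cases hmd : md ≤ 0
  · have ht : md.toNat = 0 := by omega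
    cases fuel with
    | zero => omega
    | succ f =>
      simp [pvLoopA, hmd, pvLoopA_nil, ht, pvLevels]
  · have ht : md.toNat = (md.toNat - 1) + 1 := by omega
    have h := pvMain U hU nbrs hG md (md.toNat - 1) 0 [focus] [] v r fuel (by omega) (by simpa using hf)
    simp only [List.map_cons, List.map_nil, List.append_nil] at h
    rw [ht, h]
    simp [pvLevels]

theorem pvFoldlAdd_length_le (xs : List String) :
    ∀ s : PySem.Set String, (xs.foldl PySem.Set.add s).length ≤ s.length + xs.length := by
  induction xs with
  | nil => intro s; simp
  | cons x t ih =>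
    intro s
    have h1 : (PySem.Set.add s x).length ≤ s.length + 1 := by
      unfold PySem.Set.add PySem.Set.contains
      split <;> simp
    have := ih (PySem.Set.add s x)
    simp only [List.foldl_cons, List.length_cons]
    omega

theorem pvDedup_length_le (xs : List String) : (PySem.List.dedup xs).length ≤ xs.length := by
  rw [PySem.List.dedup_eq_ofList, PySem.Set.ofList_eq_foldl]
  simpa using pvFoldlAdd_length_le xs []

-- ===== membership characterisations =====

set_option maxHeartbeats 1000000 in
theorem pvInnerMem (nbs : List String) :
    ∀ (v r X : List String) (x : String),
      (x ∈ (nbs.foldl pvStepB (v, r, X)).1 ↔ x ∈ v ∨ x ∈ nbs)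
    ∧ (x ∈ (nbs.foldl pvStepB (v, r, X)).2.1 ↔ x ∈ r ∨ (x ∈ nbs ∧ x ∉ v))
    ∧ (x ∈ (nbs.foldl pvStepB (v, r, X)).2.2 ↔ x ∈ X ∨ (x ∈ nbs ∧ x ∉ v)) := by
  induction nbs with
  | nil => intro v r X x; simp
  | cons nb t ih =>
    intro v r X x
    simp only [List.foldl_cons]
    by_cases hc : PySem.Set.contains v nb = true
    · have hnb : nb ∈ v := (PySem.Set.contains_iff v nb).mp hc
      have hxv : x = nb → x ∈ v := fun h => h ▸ hnb
      simp only [pvStepB, hc, if_pos]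
      obtain ⟨h1, h2, h3⟩ := ih v r X x
      refine ⟨?_, ?_, ?_⟩
      · rw [h1]; simp only [List.mem_cons]; tauto
      · rw [h2]; simp only [List.mem_cons]; tauto
      · rw [h3]; simp only [List.mem_cons]; tauto
    · have hnb : nb ∉ v := fun h => hc ((PySem.Set.contains_iff v nb).mpr h)
      have hxv : x = nb → x ∉ v := fun h => h ▸ hnb
      simp only [pvStepB, hc, Bool.false_eq_true, if_false]
      obtain ⟨h1, h2, h3⟩ := ih (PySem.Set.add v nb) (PySem.Set.add r nb) (X ++ [nb]) x
      refine ⟨?_, ?_, ?_⟩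
      · rw [h1, PySem.Set.mem_add]
        simp only [List.mem_cons]
        constructor
        · rintro ((h | h) | h)
          exacts [Or.inl h, Or.inr (Or.inl h), Or.inr (Or.inr h)]
        · rintro (h | h | h)
          exacts [Or.inl (Or.inl h), Or.inl (Or.inr h), Or.inr h]
      · rw [h2, PySem.Set.mem_add, PySem.Set.mem_add]
        simp only [List.mem_cons]
        constructor
        · rintro ((h | h) | ⟨ht, hnv⟩)
          exacts [Or.inl h, Or.inr ⟨Or.inl h, hxv h⟩,
            Or.inr ⟨Or.inr ht, fun hv => hnv (Or.inl hv)⟩]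
        · rintro (h | ⟨hc', hnv⟩)
          · exact Or.inl (Or.inl h)
          · rcases hc' with heq | ht
            · exact Or.inl (Or.inr heq)
            · by_cases hxe : x = nb
              · exact Or.inl (Or.inr hxe)
              · exact Or.inr ⟨ht, fun hh => hh.elim hnv hxe⟩
      · rw [h3, PySem.Set.mem_add]
        simp only [List.mem_cons, List.mem_append, List.not_mem_nil, or_false]
        constructor
        · rintro ((h | h) | ⟨ht, hnv⟩)
          exacts [Or.inl h, Or.inr ⟨Or.inl h, hxv h⟩,
            Or.inr ⟨Or.inr ht, fun hv => hnv (Or.inl hv)⟩]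
        · rintro (h | ⟨hc', hnv⟩)
          · exact Or.inl (Or.inl h)
          · rcases hc' with heq | ht
            · exact Or.inl (Or.inr heq)
            · by_cases hxe : x = nb
              · exact Or.inl (Or.inr hxe)
              · exact Or.inr ⟨ht, fun hh => hh.elim hnv hxe⟩

set_option maxHeartbeats 1000000 in
theorem pvExpandMem (nbrs : String → List String) (F : List String) :
    ∀ (v r X : List String) (x : String),
      (x ∈ (pvExpand nbrs (v, r, X) F).1 ↔ x ∈ v ∨ ∃ s ∈ F, x ∈ nbrs s)
    ∧ (x ∈ (pvExpand nbrs (v, r, X) F).2.1 ↔ x ∈ r ∨ ((∃ s ∈ F, x ∈ nbrs s) ∧ x ∉ v))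
    ∧ (x ∈ (pvExpand nbrs (v, r, X) F).2.2 ↔ x ∈ X ∨ ((∃ s ∈ F, x ∈ nbrs s) ∧ x ∉ v)) := by
  induction F with
  | nil => intro v r X x; simp [pvExpand]
  | cons f Ft ih =>
    intro v r X x
    rw [show pvExpand nbrs (v, r, X) (f :: Ft) = pvExpand nbrs ((nbrs f).foldl pvStepB (v, r, X)) Ft
        from pvExpand_cons nbrs (v, r, X) f Ft]
    obtain ⟨w, hw⟩ : ∃ w, (nbrs f).foldl pvStepB (v, r, X) = w := ⟨_, rfl⟩
    obtain ⟨i1, i2, i3⟩ := pvInnerMem (nbrs f) v r X x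
    have hi1' : ∀ y, y ∈ w.1 ↔ y ∈ v ∨ y ∈ nbrs f :=
      fun y => hw ▸ (pvInnerMem (nbrs f) v r X y).1
    rw [hw] at i1 i2 i3 ⊢
    obtain ⟨e1, e2, e3⟩ := ih w.1 w.2.1 w.2.2 x
    simp only [Prod.mk.eta] at e1 e2 e3
    have hsplit : (∃ s ∈ f :: Ft, x ∈ nbrs s) ↔ x ∈ nbrs f ∨ ∃ s ∈ Ft, x ∈ nbrs s := by
      simp [List.mem_cons, or_and_right, exists_or]
    rw [hi1' x] at e2 e3
    refine ⟨?_, ?_, ?_⟩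
    · rw [e1, i1, hsplit]
      constructor
      · rintro ((h | h) | h)
        exacts [Or.inl h, Or.inr (Or.inl h), Or.inr (Or.inr h)]
      · rintro (h | h | h)
        exacts [Or.inl (Or.inl h), Or.inl (Or.inr h), Or.inr h]
    · rw [e2, i2, hsplit]
      constructor
      · rintro ((h | ⟨hn, hv⟩) | ⟨he, hvn⟩)
        · exact Or.inl h
        · exact Or.inr ⟨Or.inl hn, hv⟩
        · exact Or.inr ⟨Or.inr he, fun hv' => hvn (Or.inl hv')⟩
      · rintro (h | ⟨hne, hv⟩)
        · exact Or.inl (Or.inl h)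
        · rcases hne with hn | he
          · exact Or.inl (Or.inr ⟨hn, hv⟩)
          · by_cases hnf : x ∈ nbrs f
            · exact Or.inl (Or.inr ⟨hnf, hv⟩)
            · exact Or.inr ⟨he, fun hh => hh.elim hv hnf⟩
    · rw [e3, i3, hsplit]
      constructor
      · rintro ((h | ⟨hn, hv⟩) | ⟨he, hvn⟩)
        · exact Or.inl h
        · exact Or.inr ⟨Or.inl hn, hv⟩
        · exact Or.inr ⟨Or.inr he, fun hv' => hvn (Or.inl hv')⟩
      · rintro (h | ⟨hne, hv⟩)
        · exact Or.inl (Or.inl h)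
        · rcases hne with hn | he
          · exact Or.inl (Or.inr ⟨hn, hv⟩)
          · by_cases hnf : x ∈ nbrs f
            · exact Or.inl (Or.inr ⟨hnf, hv⟩)
            · exact Or.inr ⟨he, fun hh => hh.elim hv hnf⟩

theorem pvRoundMemAux (r : PySem.Set String) (x : String) :
    ∀ (edges : List (String × String)) (acc : PySem.Set String),
    x ∈ edges.foldl (fun new e =>
        if PySem.Set.contains r e.1 && !(PySem.Set.contains r e.2) then PySem.Set.add new e.2 else new) acc
      ↔ x ∈ acc ∨ ((∃ e ∈ edges, e.1 ∈ r ∧ e.2 = x) ∧ x ∉ r) := by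
  intro edges
  induction edges with
  | nil => intro acc; simp
  | cons e t ih =>
    intro acc
    simp only [List.foldl_cons]
    have hsplit : (∃ e' ∈ e :: t, e'.1 ∈ r ∧ e'.2 = x) ↔
        (e.1 ∈ r ∧ e.2 = x) ∨ ∃ e' ∈ t, e'.1 ∈ r ∧ e'.2 = x := by
      simp [List.mem_cons, or_and_right, exists_or]
    by_cases hg : (PySem.Set.contains r e.1 && !(PySem.Set.contains r e.2)) = true
    · obtain ⟨hg1, hg2⟩ := Bool.and_eq_true_iff.mp hg
      have he1 : e.1 ∈ r := (PySem.Set.contains_iff r e.1).mp hg1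
      have hg2' : PySem.Set.contains r e.2 = false := by simpa using hg2
      have he2 : e.2 ∉ r := fun h => by
        rw [(PySem.Set.contains_iff r e.2).mpr h] at hg2'; exact absurd hg2' (by simp)
      have hsym : x = e.2 ↔ e.2 = x := eq_comm
      have hxr : x = e.2 → x ∉ r := fun h => h ▸ he2
      rw [if_pos hg, ih (PySem.Set.add acc e.2), PySem.Set.mem_add, hsplit]
      tauto
    · have hng : ¬((e.1 ∈ r ∧ e.2 = x) ∧ x ∉ r) := by
        rintro ⟨⟨h1, rfl⟩, h3⟩
        apply hg
        have hc1 : PySem.Set.contains r e.1 = true := (PySem.Set.contains_iff r e.1).mpr h1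
        have hc2 : PySem.Set.contains r e.2 = false := by
          cases h : PySem.Set.contains r e.2
          · rfl
          · exact absurd ((PySem.Set.contains_iff r e.2).mp h) h3
        rw [hc1, hc2]; rfl
      rw [if_neg hg, ih acc, hsplit]
      tauto

theorem pvRoundMem (edges : List (String × String)) (r : PySem.Set String) (x : String) :
    x ∈ pvRound edges r ↔ (∃ e ∈ edges, e.1 ∈ r ∧ e.2 = x) ∧ x ∉ r := by
  rw [pvRound, pvRoundMemAux]
  simp [PySem.Set.empty]

theorem pvReachMono (edges : List (String × String)) :
    ∀ (k : Nat) (r : PySem.Set String) (x : String), x ∈ r → x ∈ pvReach edges k r := by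
  intro k
  induction k with
  | zero => intro r x hx; simpa [pvReach] using hx
  | succ k ih =>
    intro r x hx
    simp only [pvReach]
    split
    · exact hx
    · exact ih _ _ ((PySem.Set.mem_update _ _ _).mpr (Or.inl hx))

theorem pvReachNodup (edges : List (String × String)) :
    ∀ (k : Nat) (r : PySem.Set String), r.Nodup → (pvReach edges k r).Nodup := by
  intro k
  induction k with
  | zero => intro r h; simpa [pvReach] using h
  | succ k ih =>
    intro r h
    simp only [pvReach]
    split
    · exact h
    · exact ih _ (PySem.Set.nodup_update _ _ h)

theorem pvInnerNodup (nbs : List String) :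
    ∀ (v r X : List String), r.Nodup → (nbs.foldl pvStepB (v, r, X)).2.1.Nodup := by
  induction nbs with
  | nil => intro v r X h; simpa using h
  | cons nb t ih =>
    intro v r X h
    simp only [List.foldl_cons]
    by_cases hc : PySem.Set.contains v nb = true
    · simp only [pvStepB, hc, if_pos]; exact ih v r X h
    · simp only [pvStepB, hc, Bool.false_eq_true, if_false]
      exact ih _ _ _ (PySem.Set.nodup_add _ _ h)

theorem pvExpandNodup (nbrs : String → List String) (F : List String) :
    ∀ (v r X : List String), r.Nodup → (pvExpand nbrs (v, r, X) F).2.1.Nodup := by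
  induction F with
  | nil => intro v r X h; simpa [pvExpand] using h
  | cons f Ft ih =>
    intro v r X h
    rw [show pvExpand nbrs (v, r, X) (f :: Ft) = pvExpand nbrs ((nbrs f).foldl pvStepB (v, r, X)) Ft
        from pvExpand_cons nbrs (v, r, X) f Ft]
    have := ih ((nbrs f).foldl pvStepB (v, r, X)).1 ((nbrs f).foldl pvStepB (v, r, X)).2.1
      ((nbrs f).foldl pvStepB (v, r, X)).2.2 (pvInnerNodup (nbrs f) v r X h)
    simpa only [Prod.mk.eta] using this

theorem pvLevelsNodup (nbrs : String → List String) :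
    ∀ (k : Nat) (F : List String) (v r : PySem.Set String), r.Nodup → (pvLevels nbrs k F v r).Nodup := by
  intro k
  induction k with
  | zero => intro F v r h; simpa [pvLevels] using h
  | succ k ih =>
    intro F v r h
    simp only [pvLevels]
    split
    · exact h
    · exact ih _ _ _ (pvExpandNodup nbrs F v r [] h)

theorem pvLevels_nil (nbrs : String → List String) (k : Nat) (v r : PySem.Set String) :
    pvLevels nbrs k [] v r = r := by
  cases k <;> simp [pvLevels]

-- edge-list membership
theorem pvEdgesMem (adj : List (String × List (String × String))) (s t : String) :
    (s, t) ∈ pvEdges adj ↔ ∃ p ∈ adj, p.1 = s ∧ ∃ e ∈ p.2, e.2 = t := by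
  simp only [pvEdges, List.mem_flatMap, List.mem_map, Prod.mk.injEq]
  constructor
  · rintro ⟨p, hp, e, he, h1, h2⟩
    exact ⟨p, hp, h1, e, he, h2⟩
  · rintro ⟨p, hp, h1, e, he, h2⟩
    exact ⟨p, hp, e, he, h1, h2⟩

-- forward neighbours (unique keys): lookups in dict(adj) see exactly the edge list
theorem pvFwdNbrs (adj : List (String × List (String × String)))
    (hkeys : (adj.map (fun p => p.1)).Nodup) (n t : String) :
    t ∈ ((PySem.Dict.mk adj).getD n []).map (fun e => e.2) ↔ (n, t) ∈ pvEdges adj := by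
  have hknd : (PySem.Dict.mk adj).keys.Nodup := by
    simpa [PySem.Dict.keys_mk] using hkeys
  rw [PySem.Dict.getD_eq_get?_getD, pvEdgesMem]
  cases hq : (PySem.Dict.mk adj).get? n with
  | none =>
    simp only [Option.getD_none, List.map_nil, List.not_mem_nil, false_iff]
    rintro ⟨p, hp, h1, -⟩
    have : n ∉ (PySem.Dict.mk adj).keys := (PySem.Dict.get?_eq_none_iff_not_mem_keys _ n).mp hq
    rw [PySem.Dict.keys_mk] at this
    exact this (List.mem_map.mpr ⟨p, hp, h1⟩)
  | some w =>
    have hitems : (n, w) ∈ adj := PySem.Dict.mem_items_of_get?_eq_some _ hq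
    simp only [Option.getD_some, List.mem_map]
    constructor
    · rintro ⟨e, he, rfl⟩
      exact ⟨(n, w), hitems, rfl, e, he, rfl⟩
    · rintro ⟨p, hp, h1, e, he, h2⟩
      have hpi : (n, p.2) ∈ (PySem.Dict.mk adj).items := by
        have : p = (n, p.2) := by
          cases p; simp_all
        rwa [← this]
      have := PySem.Dict.get?_of_mem_items _ hpi hknd
      rw [hq] at this
      have hw : w = p.2 := by injection this
      subst hw
      exact ⟨e, he, h2⟩

-- rev_adj lookups see exactly the reversed edge list
theorem pvRevStep_getD (src : String) (e : String × String) (rd : PySem.Dict String (List String)) (k : String) :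
    (pvRevStep src rd e).getD k [] = if k = e.2 then rd.getD k [] ++ [src] else rd.getD k [] := by
  unfold pvRevStep
  by_cases hc : rd.contains e.2 = true
  · simp only [hc, if_true]
    by_cases hk : k = e.2
    · subst hk; rw [PySem.Dict.getD_modify_self, if_pos rfl]
    · rw [PySem.Dict.getD_modify_of_ne _ _ _ hk, if_neg hk]
  · simp only [hc, Bool.false_eq_true, if_false]
    by_cases hk : k = e.2
    · subst hk
      rw [PySem.Dict.getD_modify_self, if_pos rfl, PySem.Dict.getD_insert_self,
        PySem.Dict.getD_of_not_contains rd _ (by simpa using hc)]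
    · rw [PySem.Dict.getD_modify_of_ne _ _ _ hk, PySem.Dict.getD_insert_of_ne _ _ _ hk, if_neg hk]

theorem pvRevInnerMem (src k x : String) :
    ∀ (reqs : List (String × String)) (rd : PySem.Dict String (List String)),
    x ∈ (reqs.foldl (pvRevStep src) rd).getD k [] ↔
      x ∈ rd.getD k [] ∨ (x = src ∧ ∃ e ∈ reqs, e.2 = k) := by
  intro reqs
  induction reqs with
  | nil => intro rd; simp
  | cons e t ih =>
    intro rd
    simp only [List.foldl_cons]
    rw [ih (pvRevStep src rd e), pvRevStep_getD]
    have hsplit : (∃ e' ∈ e :: t, e'.2 = k) ↔ e.2 = k ∨ ∃ e' ∈ t, e'.2 = k := by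
      simp [List.mem_cons, or_and_right, exists_or]
    rw [hsplit]
    by_cases hk : k = e.2
    · have hk' : e.2 = k := hk.symm
      rw [if_pos hk]
      simp only [List.mem_append, List.mem_singleton]
      tauto
    · have hk' : ¬ (e.2 = k) := fun h => hk h.symm
      rw [if_neg hk]
      tauto

theorem pvRevOuterMem (k x : String) :
    ∀ (l : List (String × List (String × String))) (rd : PySem.Dict String (List String)),
    x ∈ (l.foldl (fun rd p => p.2.foldl (pvRevStep p.1) rd) rd).getD k [] ↔
      x ∈ rd.getD k [] ∨ ∃ p ∈ l, p.1 = x ∧ ∃ e ∈ p.2, e.2 = k := by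
  intro l
  induction l with
  | nil => intro rd; simp
  | cons p t ih =>
    intro rd
    simp only [List.foldl_cons]
    rw [ih, pvRevInnerMem]
    have hsplit : (∃ q ∈ p :: t, q.1 = x ∧ ∃ e ∈ q.2, e.2 = k) ↔
        (p.1 = x ∧ ∃ e ∈ p.2, e.2 = k) ∨ ∃ q ∈ t, q.1 = x ∧ ∃ e ∈ q.2, e.2 = k := by
      simp [List.mem_cons, or_and_right, exists_or]
    rw [hsplit]
    constructor
    · rintro ((h | ⟨h1, h2⟩) | h)
      · exact Or.inl h
      · exact Or.inr (Or.inl ⟨h1.symm, h2⟩)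
      · exact Or.inr (Or.inr h)
    · rintro (h | ⟨h1, h2⟩ | h)
      · exact Or.inl (Or.inl h)
      · exact Or.inl (Or.inr ⟨h1.symm, h2⟩)
      · exact Or.inr h

theorem pvRevNbrs (adj : List (String × List (String × String))) (k x : String) :
    x ∈ (pvRevAdj adj).getD k [] ↔ (x, k) ∈ pvEdges adj := by
  rw [pvRevAdj, pvRevOuterMem, pvEdgesMem]
  simp [PySem.Dict.getD_empty]

-- main bridge: the level sweep's related set is r plus the edge-scan fixpoint's reach
set_option maxHeartbeats 1000000 in
theorem pvLevelReach (edges : List (String × String)) (nbrs : String → List String)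
    (hnbrs : ∀ s t, t ∈ nbrs s ↔ (s, t) ∈ edges) :
    ∀ (k : Nat) (F v r s : List String),
    (∀ x, x ∈ v ↔ x ∈ s) → (∀ x ∈ F, x ∈ v) →
    (∀ x, x ∈ v → x ∉ F → ∀ t, (x, t) ∈ edges → t ∈ v) → (∀ x ∈ v, x ∈ r) →
    ∀ x, x ∈ pvLevels nbrs k F v r ↔ (x ∈ r ∨ x ∈ pvReach edges k s) := by
  intro k
  induction k with
  | zero =>
    intro F v r s hvs hFv hcl hvr x
    simp only [pvLevels, pvReach]
    constructor
    · exact Or.inl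
    · rintro (h | h)
      · exact h
      · exact hvr x ((hvs x).mpr h)
  | succ k ih =>
    intro F v r s hvs hFv hcl hvr x
    simp only [pvLevels, pvReach]
    by_cases hF : F = []
    · subst hF
      have hnew : pvRound edges s = [] := by
        rw [List.eq_nil_iff_forall_not_mem]
        intro y hy
        obtain ⟨⟨e, he, he1, he2⟩, hys⟩ := (pvRoundMem edges s y).mp hy
        have hv1 : e.1 ∈ v := (hvs e.1).mpr he1
        have hv2 : e.2 ∈ v := hcl e.1 hv1 (by simp) e.2 (by rw [Prod.mk.eta]; exact he)
        exact hys ((hvs y).mp (he2 ▸ hv2))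
      rw [hnew]
      simp only [List.isEmpty_nil, if_true]
      constructor
      · exact Or.inl
      · rintro (h | h)
        · exact h
        · exact hvr x ((hvs x).mpr h)
    · have hFe : F.isEmpty = false := by simpa [List.isEmpty_iff] using hF
      rw [hFe]
      simp only [Bool.false_eq_true, if_false]
      have hroundeq : ∀ y, y ∈ pvRound edges s ↔ ((∃ s' ∈ F, y ∈ nbrs s') ∧ y ∉ v) := by
        intro y
        rw [pvRoundMem]
        constructor
        · rintro ⟨⟨e, he, he1, rfl⟩, hys⟩
          have hv1 : e.1 ∈ v := (hvs e.1).mpr he1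
          have hyv : e.2 ∉ v := fun h => hys ((hvs e.2).mp h)
          by_cases hf : e.1 ∈ F
          · exact ⟨⟨e.1, hf, (hnbrs e.1 e.2).mpr (by rw [Prod.mk.eta]; exact he)⟩, hyv⟩
          · exact absurd (hcl e.1 hv1 hf e.2 (by rw [Prod.mk.eta]; exact he)) hyv
        · rintro ⟨⟨s', hs', hy⟩, hyv⟩
          exact ⟨⟨(s', y), (hnbrs s' y).mp hy, (hvs s').mp (hFv s' hs'), rfl⟩,
            fun h => hyv ((hvs y).mpr h)⟩
      obtain ⟨m1, m2, m3⟩ := pvExpandMem nbrs F v r [] x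
      simp only [List.not_mem_nil, false_or] at m3
      by_cases hne : pvRound edges s = []
      · have hX : (pvExpand nbrs (v, r, []) F).2.2 = [] := by
          rw [List.eq_nil_iff_forall_not_mem]
          intro y hy
          have y3 := (pvExpandMem nbrs F v r [] y).2.2
          simp only [List.not_mem_nil, false_or] at y3
          exact (List.eq_nil_iff_forall_not_mem.mp hne y) ((hroundeq y).mpr (y3.mp hy))
        rw [hne]
        simp only [List.isEmpty_nil, if_true]
        rw [hX, pvLevels_nil, m2]
        constructor
        · rintro (h | h)
          · exact Or.inl h
          · exact absurd ((hroundeq x).mpr h) (List.eq_nil_iff_forall_not_mem.mp hne x)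
        · rintro (h | h)
          · exact Or.inl h
          · exact Or.inl (hvr x ((hvs x).mpr h))
      · have hne' : (pvRound edges s).isEmpty = false := by simpa [List.isEmpty_iff] using hne
        rw [hne']
        simp only [Bool.false_eq_true, if_false]
        have h1 : ∀ y, y ∈ (pvExpand nbrs (v, r, []) F).1 ↔
            y ∈ PySem.Set.update s (pvRound edges s) := by
          intro y
          rw [(pvExpandMem nbrs F v r [] y).1, PySem.Set.mem_update s (pvRound edges s) y, ← hvs y, hroundeq y]
          tauto
        have h2 : ∀ y ∈ (pvExpand nbrs (v, r, []) F).2.2, y ∈ (pvExpand nbrs (v, r, []) F).1 := by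
          intro y hy
          have y3 := (pvExpandMem nbrs F v r [] y).2.2
          simp only [List.not_mem_nil, false_or] at y3
          rw [(pvExpandMem nbrs F v r [] y).1]
          exact Or.inr (y3.mp hy).1
        have h3 : ∀ y, y ∈ (pvExpand nbrs (v, r, []) F).1 →
            y ∉ (pvExpand nbrs (v, r, []) F).2.2 →
            ∀ t, (y, t) ∈ edges → t ∈ (pvExpand nbrs (v, r, []) F).1 := by
          intro y hy hyX t ht
          rw [(pvExpandMem nbrs F v r [] y).1] at hy
          have y3 := (pvExpandMem nbrs F v r [] y).2.2
          simp only [List.not_mem_nil, false_or] at y3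
          have hyv : y ∈ v := by
            rcases hy with h | h
            · exact h
            · by_cases hv : y ∈ v
              · exact hv
              · exact absurd (y3.mpr ⟨h, hv⟩) hyX
          rw [(pvExpandMem nbrs F v r [] t).1]
          by_cases hf : y ∈ F
          · exact Or.inr ⟨y, hf, (hnbrs y t).mpr ht⟩
          · exact Or.inl (hcl y hyv hf t ht)
        have h4 : ∀ y ∈ (pvExpand nbrs (v, r, []) F).1, y ∈ (pvExpand nbrs (v, r, []) F).2.1 := by
          intro y hy
          rw [(pvExpandMem nbrs F v r [] y).1] at hy
          rw [(pvExpandMem nbrs F v r [] y).2.1]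
          rcases hy with h | h
          · exact Or.inl (hvr y h)
          · by_cases hv : y ∈ v
            · exact Or.inl (hvr y hv)
            · exact Or.inr ⟨h, hv⟩
        rw [ih (pvExpand nbrs (v, r, []) F).2.2 (pvExpand nbrs (v, r, []) F).1
          (pvExpand nbrs (v, r, []) F).2.1 (PySem.Set.update s (pvRound edges s)) h1 h2 h3 h4 x]
        rw [m2]
        constructor
        · rintro ((h | h) | h)
          · exact Or.inl h
          · exact Or.inr (pvReachMono edges k _ x
              ((PySem.Set.mem_update _ _ _).mpr (Or.inr ((hroundeq x).mpr h))))
          · exact Or.inr h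
        · rintro (h | h)
          · exact Or.inl (Or.inl h)
          · exact Or.inr h

-- ===== VERDICT (by name: the statement is the Claim_ definition above) =====
set_option maxHeartbeats 1000000 in
theorem get_related_nodes_py_spec : Claim_equal_get_related_nodes_py := by
  intro adj focus md hdom hpre
  simp only [Spec_get_related_nodes_py, get_related_nodes_py, get_related_nodes_py_alt]
  have hpre' : (adj.map (fun p => p.1)).Nodup := hpre
  have hU : (pvU adj).Nodup := PySem.List.nodup_dedup _
  have hnbrsF : ∀ n t, t ∈ ((PySem.Dict.mk adj).getD n []).map (fun e => e.2) ↔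
      (n, t) ∈ pvEdges adj := pvFwdNbrs adj hpre'
  have hER : ∀ n t, (n, t) ∈ (pvEdges adj).map (fun e => (e.2, e.1)) ↔ (t, n) ∈ pvEdges adj := by
    intro n t
    simp only [List.mem_map, Prod.mk.injEq]
    constructor
    · rintro ⟨e, he, h1, h2⟩
      rw [show (t, n) = e from by rw [← h1, ← h2]]
      exact he
    · intro h
      exact ⟨(t, n), h, rfl, rfl⟩
  have hnbrsR : ∀ n t, t ∈ (pvRevAdj adj).getD n [] ↔
      (n, t) ∈ (pvEdges adj).map (fun e => (e.2, e.1)) := by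
    intro n t
    rw [pvRevNbrs, hER]
  have hG1 : ∀ n, ∀ x ∈ ((PySem.Dict.mk adj).getD n []).map (fun e => e.2), x ∈ pvU adj := by
    intro n x hx
    obtain ⟨p, hp, h1, e, he, h2⟩ := (pvEdgesMem adj n x).mp ((hnbrsF n x).mp hx)
    exact (PySem.List.mem_dedup _ _).mpr (List.mem_append.mpr (Or.inr
      (List.mem_flatMap.mpr ⟨p, hp, List.mem_map.mpr ⟨e, he, h2⟩⟩)))
  have hG2 : ∀ n, ∀ x ∈ (pvRevAdj adj).getD n [], x ∈ pvU adj := by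
    intro n x hx
    obtain ⟨p, hp, h1, -⟩ := (pvEdgesMem adj x n).mp ((pvRevNbrs adj n x).mp hx)
    exact (PySem.List.mem_dedup _ _).mpr (List.mem_append.mpr (Or.inl
      (List.mem_map.mpr ⟨p, hp, h1⟩)))
  have hlen : (pvU adj).length ≤ adj.length + (adj.map (fun p => p.2.length)).sum := by
    have h1 := pvDedup_length_le (adj.map (fun p => p.1) ++ adj.flatMap (fun p => p.2.map (fun e => e.2)))
    have h2 : (adj.flatMap (fun p => p.2.map (fun e => e.2))).length
        = (adj.map (fun p => p.2.length)).sum := by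
      rw [List.length_flatMap]; simp
    simp only [List.length_append, List.length_map] at h1
    unfold pvU
    omega
  have hf : ∀ v : PySem.Set String,
      1 + 2 * pvCnv (pvU adj) v ≤ 1 + 2 * (adj.length + (adj.map (fun p => p.2.length)).sum) := by
    intro v
    have := List.length_filter_le (fun y => !(PySem.Set.contains v y)) (pvU adj)
    unfold pvCnv
    omega
  rw [pvPhase (pvU adj) hU _ hG1 md focus _ _ _ (hf _),
    pvPhase (pvU adj) hU _ hG2 md focus _ _ _ (hf _)]
  have hmemS0 : ∀ x, x ∈ PySem.Set.ofList [focus] ↔ x ∈ ([focus] : List String) :=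
    fun x => PySem.Set.mem_ofList _ _
  -- forward sweep
  have h1 : ∀ x, x ∈ pvLevels (fun n => ((PySem.Dict.mk adj).getD n []).map (fun e => e.2))
      md.toNat [focus] (PySem.Set.ofList [focus]) (PySem.Set.ofList [focus]) ↔
      x ∈ pvReach (pvEdges adj) md.toNat (PySem.Set.ofList [focus]) := by
    intro x
    rw [pvLevelReach (pvEdges adj) _ hnbrsF md.toNat [focus] (PySem.Set.ofList [focus])
      (PySem.Set.ofList [focus]) (PySem.Set.ofList [focus]) (fun _ => Iff.rfl)
      (fun y hy => (hmemS0 y).mpr hy)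
      (fun y hyv hyF => absurd ((hmemS0 y).mp hyv) hyF)
      (fun y hy => hy) x]
    constructor
    · rintro (h | h)
      · exact pvReachMono _ _ _ _ h
      · exact h
    · exact Or.inr
  -- backward sweep
  have h2 : ∀ x, x ∈ pvLevels (fun n => (pvRevAdj adj).getD n []) md.toNat [focus]
      (PySem.Set.ofList [focus])
      (pvLevels (fun n => ((PySem.Dict.mk adj).getD n []).map (fun e => e.2))
        md.toNat [focus] (PySem.Set.ofList [focus]) (PySem.Set.ofList [focus])) ↔
      x ∈ pvReach (pvEdges adj) md.toNat (PySem.Set.ofList [focus]) ∨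
      x ∈ pvReach ((pvEdges adj).map (fun e => (e.2, e.1))) md.toNat (PySem.Set.ofList [focus]) := by
    intro x
    rw [pvLevelReach ((pvEdges adj).map (fun e => (e.2, e.1))) _ hnbrsR md.toNat [focus]
      (PySem.Set.ofList [focus]) _ (PySem.Set.ofList [focus]) (fun _ => Iff.rfl)
      (fun y hy => (hmemS0 y).mpr hy)
      (fun y hyv hyF => absurd ((hmemS0 y).mp hyv) hyF)
      (fun y hy => (h1 y).mpr (pvReachMono _ _ _ _ hy)) x]
    rw [h1 x]
  have hAnd : (pvLevels (fun n => (pvRevAdj adj).getD n []) md.toNat [focus]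
      (PySem.Set.ofList [focus])
      (pvLevels (fun n => ((PySem.Dict.mk adj).getD n []).map (fun e => e.2))
        md.toNat [focus] (PySem.Set.ofList [focus]) (PySem.Set.ofList [focus]))).Nodup :=
    pvLevelsNodup _ _ _ _ _ (pvLevelsNodup _ _ _ _ _ (PySem.Set.nodup_ofList _))
  have hBnd : (PySem.Set.union (pvReach (pvEdges adj) md.toNat (PySem.Set.ofList [focus]))
      (pvReach ((pvEdges adj).map (fun e => (e.2, e.1))) md.toNat (PySem.Set.ofList [focus]))).Nodup :=
    PySem.Set.nodup_union _ _ (pvReachNodup _ _ _ (PySem.Set.nodup_ofList _))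
  have hperm := (List.perm_ext_iff_of_nodup hAnd hBnd).mpr (by
    intro a
    rw [h2 a, PySem.Set.mem_union _ _ a])
  exact PySem.List.sorted_eq_sorted_of_perm _ _ _ (fun a b h => h) hperm
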